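-- pv_equiv track=rewrite | github.com/sadimer/tommano | translator/template.py | split_sf_sff
-- ===== SOURCE A (Python) =====
-- def split_sf_sff(sf_addresses, sff_addresses):
--     dict_result = {}
--     num_parts = len(sff_addresses)
--     part_length = len(sf_addresses) // num_parts
--     result = [
--         sf_addresses[i : i + part_length]
--         for i in range(0, (num_parts - 1) * part_length, part_length)
--     ]
--     result.append(sf_addresses[(num_parts - 1) * part_length :])
--     for i in range(len(sff_addresses)):
--         dict_result.update({sff_addresses[i]: result[i]})
--     return dict_result
-- ===== SOURCE B (Python) =====
-- def split_sf_sff(sf_addresses, sff_addresses):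
--     part_length = len(sf_addresses) // len(sff_addresses)
--     it = iter(sf_addresses)
--     result = {}
--     for key in sff_addresses[:-1]:
--         result[key] = [next(it) for _ in range(part_length)]
--     result[sff_addresses[-1]] = list(it)
--     return result
-- ===== Notes on version B (the rewrite author's own statement) =====
-- stated objective: alternative
-- what changed: A precomputes a list of index-based slices with a stride-part_length range and then maps them onto keys by a second index loop; B never slices by index: it consumes the address list through a single iterator, taking the next part_length items for each non-last key and giving the iterator's remainder to the last key.
import Mathlib
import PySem

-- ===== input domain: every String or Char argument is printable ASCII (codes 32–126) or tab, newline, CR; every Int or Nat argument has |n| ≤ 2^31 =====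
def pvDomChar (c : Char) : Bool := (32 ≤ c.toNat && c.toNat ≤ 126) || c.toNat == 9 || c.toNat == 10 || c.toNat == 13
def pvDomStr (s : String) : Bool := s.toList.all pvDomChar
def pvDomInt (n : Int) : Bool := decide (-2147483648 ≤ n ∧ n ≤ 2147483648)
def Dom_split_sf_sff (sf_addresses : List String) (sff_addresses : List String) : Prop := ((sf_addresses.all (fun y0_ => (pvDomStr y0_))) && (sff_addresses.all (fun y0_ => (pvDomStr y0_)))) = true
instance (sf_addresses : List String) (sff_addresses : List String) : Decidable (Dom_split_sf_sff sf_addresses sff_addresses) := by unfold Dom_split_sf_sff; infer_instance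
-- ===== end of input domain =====

-- B replaces A's index-slice chunk list and second mapping loop by a single iterator pass
-- that consumes part_length addresses per non-last key; objective: alternative, no speed claim.

-- ===== PORT A =====
def split_sf_sff (sf_addresses : List String) (sff_addresses : List String) : List (String × List String) :=
  let dict_result : PySem.Dict String (List String) := PySem.Dict.empty
  let num_parts : Int := PySem.List.len sff_addresses
  let part_length : Int := PySem.Int.floordiv (PySem.List.len sf_addresses) num_parts
  let result : List (List String) :=
    (PySem.List.pyRange 0 ((num_parts - 1) * part_length) part_length).map
      (fun i => PySem.List.slice sf_addresses (some i) (some (i + part_length)))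
  let result := result ++ [PySem.List.slice sf_addresses (some ((num_parts - 1) * part_length)) none]
  ((PySem.List.pyRange 0 (PySem.List.len sff_addresses)).foldl
    (fun d i => d.insert (PySem.List.pyGetD sff_addresses i "") (PySem.List.pyGetD result i []))
    dict_result).items

-- ===== PORT B =====
-- it = iter(sf_addresses) is modelled by the not-yet-consumed suffix carried in the fold state;
-- '[next(it) for _ in range(part_length)]' takes the next part_length items (exact on Pre_:
-- the iterator is never exhausted there, so next() never raises).
def split_sf_sff_alt (sf_addresses : List String) (sff_addresses : List String) : List (String × List String) :=
  let part_length : Int := PySem.Int.floordiv (PySem.List.len sf_addresses) (PySem.List.len sff_addresses)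
  let st := (PySem.List.slice sff_addresses none (some (-1))).foldl
      (fun (st : PySem.Dict String (List String) × List String) key =>
        (st.1.insert key (st.2.take part_length.toNat), st.2.drop part_length.toNat))
      (PySem.Dict.empty, sf_addresses)
  (st.1.insert (PySem.List.pyGetD sff_addresses (-1) "") st.2).items

-- ===== PRECONDITION & SPEC =====
-- Pre_ excludes exactly the inputs where A raises: empty sff_addresses (ZeroDivisionError)
-- and len(sf) < len(sff), where part_length == 0 makes range's step 0 (ValueError);
-- on the latter inputs B itself returns a value ([] per key, the whole list to the last key).
def Pre_split_sf_sff (sf_addresses : List String) (sff_addresses : List String) : Prop :=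
  sff_addresses ≠ [] ∧ sff_addresses.length ≤ sf_addresses.length
instance (sf_addresses : List String) (sff_addresses : List String) : Decidable (Pre_split_sf_sff sf_addresses sff_addresses) := by unfold Pre_split_sf_sff; infer_instance

def pvWitness_split_sf_sff : List String × List String := (["a", "b", "c"], ["x", "y"])

def Spec_split_sf_sff (sf_addresses : List String) (sff_addresses : List String) (out : List (String × List String)) : Prop := out = split_sf_sff_alt sf_addresses sff_addresses
instance (sf_addresses : List String) (sff_addresses : List String) (out : List (String × List String)) : Decidable (Spec_split_sf_sff sf_addresses sff_addresses out) := by unfold Spec_split_sf_sff; infer_instance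

-- ===== CLAIM (what is proved, stated in full; the proofs are below) =====
def Claim_equal_split_sf_sff : Prop := ∀ (sf_addresses : List String) (sff_addresses : List String), Dom_split_sf_sff sf_addresses sff_addresses → Pre_split_sf_sff sf_addresses sff_addresses → Spec_split_sf_sff sf_addresses sff_addresses (split_sf_sff sf_addresses sff_addresses)

-- ===== LEMMAS AND PROOFS =====

-- canonical middle form: one enumerate pass inserting each key's chunk as an index slice
def pvCanon (sf_addresses : List String) (sff_addresses : List String) : List (String × List String) :=
  let num_parts : Int := PySem.List.len sff_addresses
  let part_length : Int := PySem.Int.floordiv (PySem.List.len sf_addresses) num_parts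
  ((PySem.List.enumerate sff_addresses).foldl
    (fun (d : PySem.Dict String (List String)) p =>
      d.insert p.2
        (if p.1 < num_parts - 1 then
          PySem.List.slice sf_addresses (some (p.1 * part_length)) (some ((p.1 + 1) * part_length))
        else
          PySem.List.slice sf_addresses (some ((num_parts - 1) * part_length)) none))
    PySem.Dict.empty).items

-- A's stride-part_length comprehension range is the first n-1 multiples of L.
theorem pyRange_stride_eq {n L : Int} (hn : 1 ≤ n) (hL : 0 < L) :
    PySem.List.pyRange 0 ((n - 1) * L) L =
      List.map (fun k : Nat => 0 + L * (k : Int)) (List.range (n - 1).toNat) := by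
  rw [PySem.List.pyRange_of_pos _ _ hL]
  have hc : (if (0 : Int) < (n - 1) * L then (((n - 1) * L - 0 + L - 1) / L).toNat else 0)
      = (n - 1).toNat := by
    by_cases h2 : (0 : Int) < (n - 1) * L
    · have hn2 : 2 ≤ n := by nlinarith
      rw [if_pos h2]
      have he : (n - 1) * L - 0 + L - 1 = (L - 1) + (n - 1) * L := by ring
      rw [he, Int.add_mul_ediv_right _ _ (by omega : L ≠ 0),
          Int.ediv_eq_zero_of_lt (by omega) (by omega)]
      omega
    · have hn1 : n = 1 := by nlinarith
      rw [if_neg h2, hn1]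
      simp
  rw [hc]

-- index into A's chunk list: map-of-range part for j < m, the appended tail at j = m
theorem chunks_pyGetD {α : Type} (g : Nat → Int) (f : Int → α) (x : α) (m : Nat)
    (j : Int) (d : α) (hj0 : 0 ≤ j) (hj : j < (m : Int) + 1) :
    PySem.List.pyGetD ((((List.range m).map g).map f) ++ [x]) j d =
      if j < (m : Int) then f (g j.toNat) else x := by
  rw [PySem.List.pyGetD_eq_getElem _ _ hj0 (by simp; omega)]
  by_cases h : j < (m : Int)
  · rw [List.getElem_append_left (by simp; omega)]
    simp [h]
  · have hjm : j.toNat = ((List.range m).map g |>.map f).length := by simp; omega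
    rw [List.getElem_append_right (by omega), if_neg h]
    simp [hjm]

theorem a_eq_canon (sf sff : List String) (hpre : Pre_split_sf_sff sf sff) :
    split_sf_sff sf sff = pvCanon sf sff := by
  obtain ⟨hne, hle⟩ := hpre
  unfold split_sf_sff pvCanon
  simp only [PySem.List.len_eq]
  have hn1 : 1 ≤ sff.length := List.length_pos_iff.mpr hne
  have hLn1 : 1 ≤ sf.length / sff.length := (Nat.one_le_div_iff (by omega)).mpr hle
  have hfd : PySem.Int.floordiv (sf.length : Int) (sff.length : Int)
      = ((sf.length / sff.length : Nat) : Int) := PySem.Int.floordiv_natCast sf.length sff.length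
  rw [hfd]
  set n : Int := (sff.length : Int) with hn
  set L : Int := ((sf.length / sff.length : Nat) : Int) with hLdef
  have hL0 : 0 < L := by rw [hLdef]; exact_mod_cast hLn1
  have hnn : 1 ≤ n := by rw [hn]; exact_mod_cast hn1
  rw [PySem.List.enumerate_eq_map_pyRange sff "", List.foldl_map,
      pyRange_stride_eq hnn hL0]
  simp only [PySem.List.len_eq]
  apply congrArg
  apply PySem.List.foldl_congr_mem
  intro acc j hj
  rw [PySem.List.mem_pyRange_one] at hj
  obtain ⟨hj0, hjn⟩ := hj
  have hm : (((n - 1).toNat : Nat) : Int) = n - 1 := by omega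
  rw [PySem.List.pyGetD_eq_getElem sff "" hj0 (by omega),
      chunks_pyGetD _ _ _ _ j [] hj0 (by omega), hm]
  congr 1
  by_cases hlast : j < n - 1
  · rw [if_pos hlast, if_pos hlast]
    have hjt : ((j.toNat : Nat) : Int) = j := by omega
    rw [show (0 + L * ((j.toNat : Nat) : Int) = j * L) by rw [hjt]; ring,
        show (j * L + L = (j + 1) * L) by ring]
  · rw [if_neg hlast, if_neg hlast]

-- enumerate as a map over range-zip (Nat indices)
theorem enumerate_eq_zip_range {α : Type} :
    ∀ (ys : List α) (s : Int),
    PySem.List.enumerate ys s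
      = ((List.range ys.length).zip ys).map (fun p => (s + (p.1 : Int), p.2)) := by
  intro ys
  induction ys with
  | nil => intro s; simp [PySem.List.enumerate]
  | cons y ys ih =>
    intro s
    rw [PySem.List.enumerate_cons, ih (s + 1), List.length_cons, List.range_succ_eq_map,
        List.zip_cons_cons, List.zip_map_left, List.map_cons]
    refine congrArg₂ List.cons (by simp) ?_
    rw [List.map_map]
    apply List.map_congr_left
    intro p _
    simp only [Function.comp, Prod.map, id]
    refine congrArg₂ Prod.mk ?_ rfl
    push_cast; ring

-- the iterator-consuming fold, characterised: after ys keys the dict holds their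
-- successive take-T chunks and the state is the suffix after ys.length * T items
theorem consume_fold (T : Nat) (sf0 : List String) :
    ∀ (ys : List String) (off : Nat) (d : PySem.Dict String (List String)),
    ys.foldl (fun st key => (st.1.insert key (st.2.take T), st.2.drop T)) (d, sf0.drop (off * T))
      = (((List.range ys.length).zip ys).foldl
           (fun d p => d.insert p.2 ((sf0.drop ((off + p.1) * T)).take T)) d,
         sf0.drop ((off + ys.length) * T)) := by
  intro ys
  induction ys with
  | nil => intro off d; simp
  | cons y ys ih =>
    intro off d
    rw [List.foldl_cons]
    have hdd : (sf0.drop (off * T)).drop T = sf0.drop ((off + 1) * T) := by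
      rw [List.drop_drop]
      congr 1
      ring
    rw [hdd, ih (off + 1)]
    rw [List.length_cons, List.range_succ_eq_map, List.zip_cons_cons, List.zip_map_left,
        List.foldl_cons, List.foldl_map]
    refine congrArg₂ Prod.mk ?_ ?_
    · congr 1
      funext acc p
      simp only [Prod.map, id, Nat.succ_eq_add_one]
      congr 2
      ring
    · congr 1
      ring

theorem canon_eq_alt (sf sff : List String) (hpre : Pre_split_sf_sff sf sff) :
    pvCanon sf sff = split_sf_sff_alt sf sff := by
  obtain ⟨hne, hle⟩ := hpre
  unfold pvCanon split_sf_sff_alt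
  simp only [PySem.List.len_eq]
  have hn1 : 1 ≤ sff.length := List.length_pos_iff.mpr hne
  have hfd : PySem.Int.floordiv (sf.length : Int) (sff.length : Int)
      = ((sf.length / sff.length : Nat) : Int) := PySem.Int.floordiv_natCast sf.length sff.length
  rw [hfd]
  set T : Nat := sf.length / sff.length with hT
  set ys : List String := sff.dropLast with hys
  have hz : sff = ys ++ [sff.getLast hne] := (List.dropLast_append_getLast hne).symm
  have hm : ys.length = sff.length - 1 := by rw [hys]; simp
  -- B side: dropLast slice, last element, and the consuming fold
  rw [PySem.List.slice_to_neg_one, PySem.List.pyGetD_neg_one _ _ hne]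
  have h0 : sf = sf.drop (0 * T) := by simp
  rw [show ((PySem.Dict.empty : PySem.Dict String (List String)), sf)
        = ((PySem.Dict.empty : PySem.Dict String (List String)), sf.drop (0 * T)) by rw [← h0],
      show ((T : Int)).toNat = T by simp,
      consume_fold T sf ys 0 PySem.Dict.empty]
  -- A side: split enumerate at the last element
  conv_lhs => rw [hz]
  rw [PySem.List.enumerate_append, List.foldl_append,
      show PySem.List.enumerate [sff.getLast hne] ((0 : Int) + ys.length)
        = [((ys.length : Int), sff.getLast hne)] by
          simp [PySem.List.enumerate]]
  simp only [List.foldl_cons, List.foldl_nil]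
  have hlen : ((ys ++ [sff.getLast hne]).length : Int) = (ys.length : Int) + 1 := by simp
  rw [hlen]
  apply congrArg
  congr 1
  · -- the folds over the first ys.length keys agree
    rw [enumerate_eq_zip_range ys 0, List.foldl_map]
    apply PySem.List.foldl_congr_mem
    intro acc p hp
    have hplt : p.1 < ys.length := by
      have := List.of_mem_zip hp
      exact List.mem_range.mp this.1
    simp only [Int.zero_add]
    rw [if_pos (by omega)]
    congr 1
    rw [show ((p.1 : Int)) * (T : Int) = ((p.1 * T : Nat) : Int) by push_cast; ring,
        show (((p.1 : Int)) + 1) * (T : Int) = ((p.1 * T : Nat) : Int) + ((T : Nat) : Int) by push_cast; ring,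
        PySem.List.slice_natCast_add]
    simp
  · -- the last key's chunk is the leftover suffix
    rw [if_neg (by omega),
        show ((ys.length : Int) + 1 - 1) * (T : Int) = (((ys.length * T : Nat)) : Int) by push_cast; ring,
        PySem.List.slice_from_natCast]
    simp

-- ===== VERDICT (by name: the statement is the Claim_ definition above) =====
theorem split_sf_sff_spec : Claim_equal_split_sf_sff := by
  intro sf sff _hdom hpre
  unfold Spec_split_sf_sff
  rw [a_eq_canon sf sff hpre, canon_eq_alt sf sff hpre]
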